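-- pv_equiv track=rewrite | github.com/skdltn210/Algorithm | 프로그래머스/lv3/42579. 베스트앨범/베스트앨범.py | solution
-- ===== SOURCE A (Python) =====
-- def solution(genres, plays):
--     music = []
--     g = {}
--     for i in range(len(plays)):
--         music.append([genres[i],plays[i],i])
--         if not genres[i] in g:
--             g[genres[i]] = plays[i]
--         else:
--             g[genres[i]] += plays[i]
--     li = []
--     for a,b in g.items():
--         li.append([a,b])
--     li.sort(key = lambda x : (x[1],x[0]), reverse = True)
--     music.sort(key = lambda x: (x[1]), reverse = True)
--     arr = []
--     for i in range(len(li)):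
--         cnt = 0
--         for j in range(len(music)):
--             if li[i][0] == music[j][0]:
--                 arr.append(music[j][2])
--                 cnt+=1
--             if cnt==2:
--                 break
--     return arr
-- ===== SOURCE B (Python) =====
-- def solution(genres, plays):
--     totals = {}
--     for gname, p in zip(genres, plays):
--         totals[gname] = totals.get(gname, 0) + p
--     order = sorted(range(len(plays)), key=lambda i: plays[i], reverse=True)
--     buckets = {}
--     for i in order:
--         buckets.setdefault(genres[i], []).append(i)
--     res = []
--     for gname in sorted(totals, key=lambda x: (totals[x], x), reverse=True):
--         res += buckets[gname][:2]
--     return res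
-- ===== Notes on version B (the rewrite author's own statement) =====
-- stated objective: faster
-- what changed: Replaces A's per-genre rescan of the whole sorted song list (O(G*N)) by one stable sort of the indices followed by a single bucketing pass into a genre->indices dict, from which the top two per genre are read off.
import Mathlib
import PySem

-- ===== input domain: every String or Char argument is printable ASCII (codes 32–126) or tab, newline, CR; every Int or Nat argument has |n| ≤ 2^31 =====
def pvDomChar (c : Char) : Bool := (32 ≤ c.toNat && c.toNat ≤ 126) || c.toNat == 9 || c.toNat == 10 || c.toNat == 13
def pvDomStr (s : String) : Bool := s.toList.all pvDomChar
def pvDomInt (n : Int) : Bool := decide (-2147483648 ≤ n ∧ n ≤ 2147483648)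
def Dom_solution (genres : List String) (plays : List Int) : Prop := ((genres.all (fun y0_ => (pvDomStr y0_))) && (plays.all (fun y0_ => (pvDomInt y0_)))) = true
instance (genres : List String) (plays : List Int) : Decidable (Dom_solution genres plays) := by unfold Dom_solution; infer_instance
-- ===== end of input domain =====

-- B replaces A's per-genre rescan of the whole sorted song list by one stable sort of the
-- indices plus a single bucketing pass into a genre→indices dict (objective: faster).

-- ===== PORT A =====
-- A's inner loop: scan the sorted song list, appending indices of the genre, breaking once cnt == 2
def pvInner (gname : String) : List (String × Int × Int) → Int → List Int → List Int
  | [], _, arr => arr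
  | m :: rest, cnt, arr =>
    let arr' := if gname == m.1 then arr ++ [m.2.2] else arr
    let cnt' := if gname == m.1 then cnt + 1 else cnt
    if cnt' == 2 then arr' else pvInner gname rest cnt' arr'

def solution (genres : List String) (plays : List Int) : List Int :=
  let ms := (PySem.List.pyRange 0 (plays.length : Int)).foldl
    (fun (s : List (String × Int × Int) × PySem.Dict String Int) i =>
      (s.1 ++ [(PySem.List.pyGetD genres i "", PySem.List.pyGetD plays i 0, i)],
       if (s.2.contains (PySem.List.pyGetD genres i "")) = false then
         s.2.insert (PySem.List.pyGetD genres i "") (PySem.List.pyGetD plays i 0)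
       else
         s.2.insert (PySem.List.pyGetD genres i "")
           (s.2.getD (PySem.List.pyGetD genres i "") 0 + PySem.List.pyGetD plays i 0)))
    ([], PySem.Dict.empty)
  let li := ms.2.items.foldl (fun acc p => acc ++ [(p.1, p.2)]) []
  let li' := PySem.List.sorted2 li (fun x => x.2) (fun x => x.1) true
  let music' := PySem.List.sorted ms.1 (fun x => x.2.1) true
  li'.foldl (fun arr p => pvInner p.1 music' 0 arr) []

-- ===== PORT B =====
def solution_alt (genres : List String) (plays : List Int) : List Int :=
  let totals := (genres.zip plays).foldl
    (fun (d : PySem.Dict String Int) p => d.insert p.1 (d.getD p.1 0 + p.2)) PySem.Dict.empty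
  let order := PySem.List.sorted (PySem.List.pyRange 0 (plays.length : Int))
    (fun i => PySem.List.pyGetD plays i 0) true
  let buckets := order.foldl
    (fun (d : PySem.Dict String (List Int)) i =>
      d.modify (PySem.List.pyGetD genres i "") [] (fun l => l ++ [i])) PySem.Dict.empty
  let gorder := PySem.List.sorted2 totals.keys (fun x => totals.getD x 0) (fun x => x) true
  gorder.foldl (fun res gname => res ++ PySem.List.slice (buckets.getD gname []) none (some 2)) []

-- ===== PRECONDITION & SPEC =====
-- Pre_ excludes only the inputs where A raises: with plays longer than genres, A's genres[i] is an IndexError.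
def Pre_solution (genres : List String) (plays : List Int) : Prop := plays.length ≤ genres.length
instance (genres : List String) (plays : List Int) : Decidable (Pre_solution genres plays) := by unfold Pre_solution; infer_instance
def pvWitness_solution : List String × List Int := (["pop", "rock", "pop"], [500, 600, 150])

def Spec_solution (genres : List String) (plays : List Int) (out : List Int) : Prop := out = solution_alt genres plays
instance (genres : List String) (plays : List Int) (out : List Int) : Decidable (Spec_solution genres plays out) := by unfold Spec_solution; infer_instance

-- ===== CLAIM (what is proved, stated in full; the proofs are below) =====
def Claim_equal_solution : Prop := ∀ (genres : List String) (plays : List Int), Dom_solution genres plays → Pre_solution genres plays → Spec_solution genres plays (solution genres plays)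

-- ===== LEMMAS AND PROOFS =====

-- proof-side names for B's intermediate data
def pvTotals (genres : List String) (plays : List Int) : PySem.Dict String Int :=
  (genres.zip plays).foldl
    (fun (d : PySem.Dict String Int) p => d.insert p.1 (d.getD p.1 0 + p.2)) PySem.Dict.empty

def pvOrder (plays : List Int) : List Int :=
  PySem.List.sorted (PySem.List.pyRange 0 (plays.length : Int))
    (fun i => PySem.List.pyGetD plays i 0) true

-- common normal form of both programs
def pvNF (genres : List String) (plays : List Int) : List Int :=
  (PySem.List.sorted2 (pvTotals genres plays).keys
      (fun x => (pvTotals genres plays).getD x 0) (fun x => x) true).foldl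
    (fun res k =>
      res ++ ((pvOrder plays).filter (fun i => PySem.List.pyGetD genres i "" == k)).take 2) []

lemma pvInsertBy_map {α β : Type} (f : α → β) (bef : β → β → Bool) (x : α) (l : List α) :
    PySem.List.insertBy bef (f x) (l.map f)
      = List.map f (PySem.List.insertBy (fun a b => bef (f a) (f b)) x l) := by
  induction l with
  | nil => rfl
  | cons y ys ih =>
    by_cases h : bef (f x) (f y) = true <;>
      simp [PySem.List.insertBy, h, ih]

lemma pvFoldl_insertBy_map {α β : Type} (f : α → β) (bef : β → β → Bool) :
    ∀ (l : List α) (acc : List α),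
      List.foldl (fun acc x => PySem.List.insertBy bef x acc) (acc.map f) (l.map f)
        = List.map f (List.foldl (fun acc x => PySem.List.insertBy (fun a b => bef (f a) (f b)) x acc) acc l) := by
  intro l
  induction l with
  | nil => intro acc; rfl
  | cons x xs ih =>
    intro acc
    simp only [List.map_cons, List.foldl_cons]
    rw [pvInsertBy_map]
    exact ih _

lemma pvSortedRevMap {α β κ : Type} [LT κ] [DecidableLT κ] (f : α → β) (key : β → κ) (l : List α) :
    PySem.List.sorted (l.map f) key true
      = List.map f (PySem.List.sorted l (fun x => key (f x)) true) := by
  rw [PySem.List.sorted_rev_eq_foldl_insertBy, PySem.List.sorted_rev_eq_foldl_insertBy]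
  simpa using pvFoldl_insertBy_map f (fun a b => decide (key b < key a)) l []

lemma pvSorted2RevMap {α β κ₁ κ₂ : Type} [LT κ₁] [DecidableLT κ₁] [LT κ₂] [DecidableLT κ₂]
    (f : α → β) (k1 : β → κ₁) (k2 : β → κ₂) (l : List α) :
    PySem.List.sorted2 (l.map f) k1 k2 true
      = List.map f (PySem.List.sorted2 l (fun x => k1 (f x)) (fun x => k2 (f x)) true) := by
  have h1 : PySem.List.sorted2 (l.map f) k1 k2 true
      = List.foldl (fun acc x => PySem.List.insertBy
          (fun a b => decide (k1 b < k1 a) || (!decide (k1 a < k1 b) && decide (k2 b < k2 a))) x acc) [] (l.map f) := rfl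
  have h2 : PySem.List.sorted2 l (fun x => k1 (f x)) (fun x => k2 (f x)) true
      = List.foldl (fun acc x => PySem.List.insertBy
          (fun a b => decide (k1 (f b) < k1 (f a)) || (!decide (k1 (f a) < k1 (f b)) && decide (k2 (f b) < k2 (f a)))) x acc) [] l := rfl
  rw [h1, h2]
  simpa using pvFoldl_insertBy_map f
    (fun a b => decide (k1 b < k1 a) || (!decide (k1 a < k1 b) && decide (k2 b < k2 a))) l []

lemma pvZipEq (genres : List String) (plays : List Int) (hpre : plays.length ≤ genres.length) :
    (PySem.List.pyRange 0 (plays.length : Int)).map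
        (fun i => (PySem.List.pyGetD genres i "", PySem.List.pyGetD plays i 0))
      = genres.zip plays := by
  rw [PySem.List.pyRange_zero_natCast, List.map_map]
  apply List.ext_getElem
  · simp; omega
  · intro i h1 h2
    have hi : i < plays.length := by simpa using h1
    simp [Function.comp, PySem.List.pyGetD_natCast, hi, Nat.lt_of_lt_of_le hi hpre]

lemma pvInnerSpec (gname : String) : ∀ (ms : List (String × Int × Int)) (cnt : Int) (arr : List Int),
    cnt = 0 ∨ cnt = 1 →
    pvInner gname ms cnt arr
      = arr ++ (((ms.filter (fun m => gname == m.1)).take (2 - cnt.toNat)).map (fun m => m.2.2)) := by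
  intro ms
  induction ms with
  | nil => intro cnt arr _; simp [pvInner]
  | cons m rest ih =>
    intro cnt arr h
    by_cases hg : (gname == m.1) = true
    · rcases h with h | h <;> subst h
      · have hstep : pvInner gname (m :: rest) 0 arr = pvInner gname rest 1 (arr ++ [m.2.2]) := by
          simp [pvInner, hg]
        rw [hstep, ih 1 (arr ++ [m.2.2]) (Or.inr rfl)]
        simp [hg]
      · have hstep : pvInner gname (m :: rest) 1 arr = arr ++ [m.2.2] := by
          simp [pvInner, hg]
        rw [hstep]
        simp [hg]
    · rcases h with h | h <;> subst h
      · have hstep : pvInner gname (m :: rest) 0 arr = pvInner gname rest 0 arr := by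
          simp [pvInner, hg]
        rw [hstep, ih 0 arr (Or.inl rfl)]
        simp [hg]
      · have hstep : pvInner gname (m :: rest) 1 arr = pvInner gname rest 1 arr := by
          simp [pvInner, hg]
        rw [hstep, ih 1 arr (Or.inr rfl)]
        simp [hg]

lemma pvBuckets_getD (genres : List String) (plays : List Int) (k : String) :
    ((pvOrder plays).foldl
        (fun (d : PySem.Dict String (List Int)) i =>
          d.modify (PySem.List.pyGetD genres i "") [] (fun l => l ++ [i])) PySem.Dict.empty).getD k []
      = (pvOrder plays).filter (fun i => PySem.List.pyGetD genres i "" == k) := by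
  rw [show (pvOrder plays).foldl
      (fun (d : PySem.Dict String (List Int)) i =>
        d.modify (PySem.List.pyGetD genres i "") [] (fun l => l ++ [i])) PySem.Dict.empty
      = ((pvOrder plays).map (fun i => (PySem.List.pyGetD genres i "", i))).foldl
        (fun d p => d.modify p.1 [] (fun l => l ++ [p.2])) PySem.Dict.empty from by
    rw [List.foldl_map]]
  rw [PySem.Dict.getD_foldl_modify_append]
  simp [List.filter_map, List.map_map, Function.comp_def]

lemma pvB_eq (genres : List String) (plays : List Int) :
    solution_alt genres plays = pvNF genres plays := by
  simp only [solution_alt, pvNF, pvTotals, pvOrder]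
  congr 1
  funext res k
  congr 1
  rw [show ((PySem.List.sorted (PySem.List.pyRange 0 (plays.length : Int))
      (fun i => PySem.List.pyGetD plays i 0) true).foldl
        (fun (d : PySem.Dict String (List Int)) i =>
          d.modify (PySem.List.pyGetD genres i "") [] (fun l => l ++ [i])) PySem.Dict.empty).getD k []
    = (pvOrder plays).filter (fun i => PySem.List.pyGetD genres i "" == k) from pvBuckets_getD genres plays k]
  rw [PySem.List.slice_to _ (by norm_num)]
  simp [pvOrder]

lemma pvTotalsKeysNodup (genres : List String) (plays : List Int) :
    (pvTotals genres plays).keys.Nodup := by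
  exact PySem.Dict.nodup_keys_foldl_insert_key _ Prod.fst
    (fun d p => d.getD p.1 0 + p.2) PySem.Dict.empty (by simp [PySem.Dict.keys_empty])

lemma pvA_eq (genres : List String) (plays : List Int) (hpre : plays.length ≤ genres.length) :
    solution genres plays = pvNF genres plays := by
  simp only [solution]
  rw [PySem.List.foldl_prod_mk
    (f := fun acc i => acc ++ [(PySem.List.pyGetD genres i "", PySem.List.pyGetD plays i 0, i)])
    (g := fun (d : PySem.Dict String Int) i =>
      if (d.contains (PySem.List.pyGetD genres i "")) = false then
        d.insert (PySem.List.pyGetD genres i "") (PySem.List.pyGetD plays i 0)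
      else
        d.insert (PySem.List.pyGetD genres i "")
          (d.getD (PySem.List.pyGetD genres i "") 0 + PySem.List.pyGetD plays i 0))]
  -- the dict accumulator equals B's totals
  have htot : (PySem.List.pyRange 0 (plays.length : Int)).foldl
      (fun (d : PySem.Dict String Int) i =>
        if (d.contains (PySem.List.pyGetD genres i "")) = false then
          d.insert (PySem.List.pyGetD genres i "") (PySem.List.pyGetD plays i 0)
        else
          d.insert (PySem.List.pyGetD genres i "")
            (d.getD (PySem.List.pyGetD genres i "") 0 + PySem.List.pyGetD plays i 0)) PySem.Dict.empty
      = pvTotals genres plays := by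
    have hstep : List.foldl
        (fun (d : PySem.Dict String Int) i =>
          if (d.contains (PySem.List.pyGetD genres i "")) = false then
            d.insert (PySem.List.pyGetD genres i "") (PySem.List.pyGetD plays i 0)
          else
            d.insert (PySem.List.pyGetD genres i "")
              (d.getD (PySem.List.pyGetD genres i "") 0 + PySem.List.pyGetD plays i 0))
        PySem.Dict.empty (PySem.List.pyRange 0 (plays.length : Int))
        = List.foldl
          (fun (d : PySem.Dict String Int) i =>
            d.insert (PySem.List.pyGetD genres i "")
              (d.getD (PySem.List.pyGetD genres i "") 0 + PySem.List.pyGetD plays i 0))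
          PySem.Dict.empty (PySem.List.pyRange 0 (plays.length : Int)) := by
      apply PySem.List.foldl_congr_mem
      intro d i _
      by_cases hc : (d.contains (PySem.List.pyGetD genres i "")) = false
      · rw [if_pos hc, PySem.Dict.getD_of_not_contains d 0 hc, zero_add]
      · rw [if_neg hc]
    have hzip : List.foldl
        (fun (d : PySem.Dict String Int) i =>
          d.insert (PySem.List.pyGetD genres i "")
            (d.getD (PySem.List.pyGetD genres i "") 0 + PySem.List.pyGetD plays i 0))
        PySem.Dict.empty (PySem.List.pyRange 0 (plays.length : Int))
        = pvTotals genres plays := by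
      rw [pvTotals, ← pvZipEq genres plays hpre, List.foldl_map]
    exact hstep.trans hzip
  -- the music accumulator is the index list mapped to triples
  have hmus : (PySem.List.pyRange 0 (plays.length : Int)).foldl
      (fun acc i => acc ++ [(PySem.List.pyGetD genres i "", PySem.List.pyGetD plays i 0, i)]) ([] : List (String × Int × Int))
      = (PySem.List.pyRange 0 (plays.length : Int)).map
        (fun i => (PySem.List.pyGetD genres i "", PySem.List.pyGetD plays i 0, i)) := by
    simpa using PySem.List.foldl_append_singleton_eq_map
      (fun i => (PySem.List.pyGetD genres i "", PySem.List.pyGetD plays i 0, i))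
      (PySem.List.pyRange 0 (plays.length : Int)) []
  simp only [htot, hmus]
  -- li is just the items list
  have hli : (pvTotals genres plays).items.foldl
      (fun acc (p : String × Int) => acc ++ [(p.1, p.2)]) []
      = (pvTotals genres plays).items := by
    simpa using PySem.List.foldl_append_singleton_eq_map
      (fun (p : String × Int) => (p.1, p.2)) (pvTotals genres plays).items []
  rw [hli]
  -- items as a map over keys, sorted2 commutes with the map
  rw [PySem.Dict.items_eq_map_keys (pvTotals genres plays) (pvTotalsKeysNodup genres plays) 0]
  rw [pvSorted2RevMap]
  -- music sort commutes with the map to triples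
  rw [pvSortedRevMap]
  -- collapse the outer fold over the mapped genre list
  rw [List.foldl_map]
  show (PySem.List.sorted2 (pvTotals genres plays).keys
      (fun x => (pvTotals genres plays).getD x 0) (fun x => x) true).foldl
    (fun arr k => pvInner k
      ((pvOrder plays).map
        (fun i => (PySem.List.pyGetD genres i "", PySem.List.pyGetD plays i 0, i))) 0 arr) []
    = pvNF genres plays
  rw [pvNF]
  -- per genre: A's scan is take-2-of-filter over the sorted index list
  apply PySem.List.foldl_congr_mem
  intro arr k _
  rw [pvInnerSpec k _ 0 arr (Or.inl rfl)]
  congr 1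
  rw [List.filter_map]
  rw [show ((pvOrder plays).filter
      ((fun (m : String × Int × Int) => k == m.1) ∘
        (fun i => (PySem.List.pyGetD genres i "", PySem.List.pyGetD plays i 0, i))))
    = (pvOrder plays).filter (fun i => PySem.List.pyGetD genres i "" == k) from
    List.filter_congr (fun i _ => by simp [eq_comm])]
  simp [← List.map_take, List.map_map, Function.comp_def]

-- ===== VERDICT (by name: the statement is the Claim_ definition above) =====
theorem solution_spec : Claim_equal_solution := by
  intro genres plays _ hpre
  unfold Spec_solution
  rw [pvA_eq genres plays hpre, pvB_eq genres plays]
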